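-- pv_equiv track=rewrite | github.com/ganeshkumarm1/CodeChef-Solutions | Practice/Easy/COMPILER.py | solve
-- ===== SOURCE A (Python) =====
-- def solve(brackets):
--     stack = 0
--
--     longest_prefix = 0
--
--     for j in range(0, len(brackets)):
--         bracket = brackets[j]
--         if bracket == '<':
--             stack += 1
--         else:
--             stack -= 1
--
--         if stack == 0:
--             longest_prefix = j + 1
--         elif stack < 0:
--             return longest_prefix
--
--     return longest_prefix
-- ===== SOURCE B (Python) =====
-- def solve(brackets):
--     # Two-pass: build the running-balance table, find the first-negative cutoff,
--     # then take the last position before the cutoff where the balance is zero.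
--     sums = []
--     s = 0
--     for ch in brackets:
--         s += 1 if ch == '<' else -1
--         sums.append(s)
--     cutoff = next((i for i, v in enumerate(sums) if v < 0), len(sums))
--     best = 0
--     for i in range(cutoff):
--         if sums[i] == 0:
--             best = i + 1
--     return best
-- ===== Notes on version B (the rewrite author's own statement) =====
-- stated objective: alternative
-- what changed: Replaces A's single interleaved scan with early return by a two-pass table-then-locate shape: build the full running-balance table, compute the first-negative cutoff index, then locate the last zero-balance position before the cutoff.
import Mathlib
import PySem

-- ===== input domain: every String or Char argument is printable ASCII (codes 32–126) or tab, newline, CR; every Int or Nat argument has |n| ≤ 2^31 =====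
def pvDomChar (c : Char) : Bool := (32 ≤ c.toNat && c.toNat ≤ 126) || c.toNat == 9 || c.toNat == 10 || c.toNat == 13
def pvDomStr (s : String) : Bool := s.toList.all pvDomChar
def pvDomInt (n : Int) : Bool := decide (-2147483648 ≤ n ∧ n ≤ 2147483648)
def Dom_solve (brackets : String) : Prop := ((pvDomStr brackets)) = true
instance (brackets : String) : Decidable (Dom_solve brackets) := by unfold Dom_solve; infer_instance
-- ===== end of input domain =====

-- B replaces A's single interleaved scan (early return) by a two-pass table-then-locate
-- shape of the same cost: alternative decomposition, no speed claim.


-- ===== PORT A =====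
-- A's loop over j with mutable stack/longest_prefix and an early return.
def solveAux : List Char → Nat → Int → Int → Int
  | [], _, _, lp => lp
  | c :: rest, j, stack, lp =>
    let stack' := if c = '<' then stack + 1 else stack - 1
    if stack' = 0 then solveAux rest (j+1) stack' ((j : Int) + 1)
    else if stack' < 0 then lp
    else solveAux rest (j+1) stack' lp

def solve (brackets : String) : Int := solveAux brackets.toList 0 0 0

-- ===== PORT B =====
-- the running-balance table `sums` of Source B
def prefixSums : Int → List Char → List Int
  | _, [] => []
  | s, c :: rest =>
    let s' := s + (if c = '<' then 1 else -1)
    s' :: prefixSums s' rest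

def solve_alt (brackets : String) : Int :=
  let sums := prefixSums 0 brackets.toList
  let cutoff := sums.findIdx (fun v => decide (v < 0))
  (List.range cutoff).foldl (fun best i => if sums.getD i 0 = 0 then ((i : Int) + 1) else best) 0

-- ===== PRECONDITION & SPEC =====
def Spec_solve (brackets : String) (out : Int) : Prop := out = solve_alt brackets
instance (brackets : String) (out : Int) : Decidable (Spec_solve brackets out) := by unfold Spec_solve; infer_instance

-- ===== CLAIM (what is proved, stated in full; the proofs are below) =====
def Claim_equal_solve : Prop := ∀ (brackets : String), Dom_solve brackets → Spec_solve brackets (solve brackets)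

-- ===== LEMMAS AND PROOFS =====

-- A's loop reformulated over the prefix-sum list
def gScan : List Int → Nat → Int → Int
  | [], _, lp => lp
  | s :: rest, j, lp =>
    if s = 0 then gScan rest (j+1) ((j : Int) + 1)
    else if s < 0 then lp
    else gScan rest (j+1) lp

-- "last zero position + 1" over a (negative-free) list
def locate : List Int → Nat → Int → Int
  | [], _, lp => lp
  | s :: rest, j, lp => locate rest (j+1) (if s = 0 then ((j : Int) + 1) else lp)

theorem solveAux_eq_gScan (cs : List Char) : ∀ (j : Nat) (stack lp : Int),
    solveAux cs j stack lp = gScan (prefixSums stack cs) j lp := by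
  induction cs with
  | nil => intro j stack lp; rfl
  | cons c rest ih =>
    intro j stack lp
    simp only [solveAux, prefixSums, gScan]
    have h : (if c = '<' then stack + 1 else stack - 1)
        = stack + (if c = '<' then 1 else -1) := by split <;> ring
    rw [h]
    split <;> [skip; split] <;> simp [ih]

theorem gScan_eq_locate (sums : List Int) : ∀ (j : Nat) (lp : Int),
    gScan sums j lp
      = locate (sums.take (sums.findIdx (fun v => decide (v < 0)))) j lp := by
  induction sums with
  | nil => intro j lp; rfl
  | cons s rest ih =>
    intro j lp
    by_cases hneg : s < 0
    · have hne : s ≠ 0 := by omega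
      simp [gScan, List.findIdx_cons, hneg, hne, locate]
    · simp only [gScan, List.findIdx_cons, hneg, decide_false, cond_false, List.take_succ_cons,
        locate]
      by_cases hz : s = 0 <;> simp [hz, ih]

theorem locate_append_single (l : List Int) : ∀ (x : Int) (j : Nat) (a : Int),
    locate (l ++ [x]) j a
      = if x = 0 then ((j + l.length : Nat) : Int) + 1 else locate l j a := by
  induction l with
  | nil => intro x j a; by_cases hx : x = 0 <;> simp [locate, hx]
  | cons s rest ih =>
    intro x j a
    simp only [List.cons_append, locate, ih]
    by_cases hx : x = 0 <;> simp [hx]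
    ring

theorem foldl_range_eq_locate (sums : List Int) : ∀ (k : Nat), k ≤ sums.length →
    (List.range k).foldl (fun best i => if sums.getD i 0 = 0 then ((i : Int) + 1) else best) 0
      = locate (sums.take k) 0 0 := by
  intro k
  induction k with
  | zero => intro _; rfl
  | succ n ih =>
    intro hk
    have hn : n < sums.length := by omega
    have htake : sums.take (n+1) = sums.take n ++ [sums[n]] := by
      rw [List.take_add_one]
      simp [List.getElem?_eq_getElem hn]
    rw [List.range_succ, List.foldl_append, htake, locate_append_single,
      ih (by omega)]
    have hlen : (sums.take n).length = n := by simp [Nat.le_of_lt hn]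
    rw [hlen]
    have hget : sums.getD n 0 = sums[n] := by
      simp [List.getD, List.getElem?_eq_getElem hn]
    simp only [List.foldl_cons, List.foldl_nil, hget]
    split <;> simp

-- ===== VERDICT (by name: the statement is the Claim_ definition above) =====
theorem solve_spec : Claim_equal_solve := by
  intro brackets _
  unfold Spec_solve solve solve_alt
  rw [solveAux_eq_gScan, gScan_eq_locate]
  exact (foldl_range_eq_locate _ _ List.findIdx_le_length).symm
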